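-- pv_equiv track=rewrite | github.com/gbh5854/gbh5854 | 코테/programmers/고득점kit/Hash/phone_number_list.py | solution
-- ===== SOURCE A (Python) =====
-- def solution(phone_book):
--     answer = True
--     phone_book.sort()
--
--     for i in range(1, len(phone_book)):
--         length = len(phone_book[i-1])
--
--         if phone_book[i-1] == phone_book[i][:length]:
--             answer = False
--
--     return answer
-- ===== SOURCE B (Python) =====
-- def solution(phone_book):
--     phone_book.sort()  # kept only to reproduce A's in-place mutation of the argument
--     numbers = set(phone_book)
--     if len(numbers) != len(phone_book):
--         return False
--     for p in phone_book:
--         for j in range(len(p)):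
--             if p[:j] in numbers:
--                 return False
--     return True
-- ===== Notes on version B (the rewrite author's own statement) =====
-- stated objective: idiomatic
-- what changed: Replaces the sort-then-adjacent-prefix scan by the standard hash-set solution: build a set of all numbers, report a duplicate via a length comparison, and test every proper prefix of every number for membership in the set (sort() is kept only for A's in-place mutation side effect).
import Mathlib
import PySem

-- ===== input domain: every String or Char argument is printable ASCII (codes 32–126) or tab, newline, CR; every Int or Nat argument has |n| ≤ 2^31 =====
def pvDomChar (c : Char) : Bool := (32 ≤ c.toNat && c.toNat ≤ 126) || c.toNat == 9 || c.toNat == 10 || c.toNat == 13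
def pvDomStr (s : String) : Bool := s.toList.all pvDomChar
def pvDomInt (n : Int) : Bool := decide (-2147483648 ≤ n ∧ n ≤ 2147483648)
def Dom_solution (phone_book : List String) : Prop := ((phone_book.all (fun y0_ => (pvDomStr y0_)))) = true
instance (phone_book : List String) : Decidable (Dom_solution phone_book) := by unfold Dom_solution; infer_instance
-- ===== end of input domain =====

-- B replaces A's sort-then-adjacent-prefix scan by the idiomatic hash-set solution (duplicate check via set size,
-- then membership tests for every proper prefix); A and B both sort the argument in place, the theorems are about the return value.


-- ===== PORT A =====
def solution (phone_book : List String) : Bool :=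
  let pb := PySem.List.sorted phone_book (fun x => x)
  (PySem.List.pyRange 1 (pb.length : Int)).foldl
    (fun answer i =>
      let length := PySem.Str.len (PySem.List.pyGetD pb (i - 1) "")
      if PySem.List.pyGetD pb (i - 1) "" == PySem.Str.slice (PySem.List.pyGetD pb i "") none (some length)
      then false
      else answer)
    true

-- ===== PORT B =====
def solution_alt (phone_book : List String) : Bool :=
  let pb := PySem.List.sorted phone_book (fun x => x)
  let numbers : PySem.Set String := PySem.Set.ofList pb
  if numbers.length ≠ pb.length then false
  else
    !(pb.any fun p =>
      (PySem.List.pyRange 0 (PySem.Str.len p)).any fun j =>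
        PySem.Set.contains numbers (PySem.Str.slice p none (some j)))

-- ===== PRECONDITION & SPEC =====
def Spec_solution (phone_book : List String) (out : Bool) : Prop := out = solution_alt phone_book
instance (phone_book : List String) (out : Bool) : Decidable (Spec_solution phone_book out) := by unfold Spec_solution; infer_instance

-- ===== CLAIM (what is proved, stated in full; the proofs are below) =====
def Claim_equal_solution : Prop := ∀ (phone_book : List String), Dom_solution phone_book → Spec_solution phone_book (solution phone_book)

-- ===== LEMMAS AND PROOFS =====

-- "no adjacent pair of the sorted list is in the prefix relation" (what A's loop checks)
def PropA (s : List String) : Prop := ∀ k : Nat, (h : k + 1 < s.length) → ¬ (s[k].toList <+: s[k+1].toList)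

-- "no duplicates and no element is a proper prefix of another" (what B checks)
def PropB (s : List String) : Prop :=
  s.Nodup ∧ ∀ p ∈ s, ∀ j : Nat, j < p.toList.length → ∀ q ∈ s, q.toList ≠ p.toList.take j

-- lexicographic sandwich: a prefix of y that is ≤ z ≤ y is also a prefix of z
theorem lex_sandwich : ∀ (x z y : List Char), x <+: y → x ≤ z → z ≤ y → x <+: z := by
  intro x
  induction x with
  | nil => intro z y _ _ _; exact List.nil_prefix
  | cons c x' ih =>
    intro z y hpre hxz hzy
    obtain ⟨t, rfl⟩ := hpre
    have hxz' : ¬ z < c :: x' := not_lt.mpr hxz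
    have hzy' : ¬ c :: (x' ++ t) < z := not_lt.mpr hzy
    cases z with
    | nil => exact absurd (List.nil_lt_cons c x') hxz'
    | cons d z' =>
      rw [List.cons_lt_cons_iff] at hxz' hzy'
      push Not at hxz' hzy'
      have hcd' : c = d := le_antisymm hxz'.1 hzy'.1
      subst hcd'
      have h1 : x' ≤ z' := hxz'.2 rfl
      have h2 : z' ≤ x' ++ t := hzy'.2 rfl
      exact List.cons_prefix_cons.mpr ⟨rfl, ih z' (x' ++ t) (List.prefix_append _ _) h1 h2⟩

-- a proper prefix is lexicographically smaller
theorem lex_prefix_lt : ∀ (x y : List Char), x <+: y → x ≠ y → x < y := by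
  intro x
  induction x with
  | nil =>
    intro y _ hne
    cases y with
    | nil => exact absurd rfl hne
    | cons a l => exact List.nil_lt_cons a l
  | cons c x' ih =>
    intro y hpre hne
    obtain ⟨t, rfl⟩ := hpre
    refine List.cons_lt_cons_iff.mpr (Or.inr ⟨rfl, ih (x' ++ t) (List.prefix_append _ _) ?_⟩)
    intro h
    exact hne (congrArg (c :: ·) h)

-- in a sorted list, any prefix pair yields an adjacent prefix pair
theorem step_adjacent (s : List String) (hs : List.Pairwise (· ≤ ·) s)
    {a b : Nat} (hab : a < b) (hb : b < s.length)
    (hpre : s[a].toList <+: s[b].toList) :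
    ∃ k : Nat, ∃ _h : k + 1 < s.length, s[k].toList <+: s[k+1].toList := by
  have hp := List.pairwise_iff_getElem.mp hs
  have ha1 : a + 1 < s.length := by omega
  refine ⟨a, ha1, ?_⟩
  rcases Nat.lt_or_ge (a + 1) b with h | h
  · have h1 : s[a] ≤ s[a+1] := hp a (a+1) (by omega) ha1 (by omega)
    have h2 : s[a+1] ≤ s[b] := hp (a+1) b ha1 hb h
    exact lex_sandwich _ _ _ hpre (String.le_iff_toList_le.mp h1) (String.le_iff_toList_le.mp h2)
  · have : b = a + 1 := by omega
    subst this
    exact hpre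

theorem propA_iff_propB (s : List String) (hs : List.Pairwise (· ≤ ·) s) : PropA s ↔ PropB s := by
  constructor
  · -- PropA → PropB, by contraposition on each conjunct
    intro hA
    constructor
    · -- Nodup
      by_contra hnd
      rw [List.Nodup, List.pairwise_iff_getElem] at hnd
      push Not at hnd
      obtain ⟨i, j, hi, hj, hij, heq⟩ := hnd
      obtain ⟨k, hk, hkpre⟩ := step_adjacent s hs hij hj (by rw [heq])
      exact hA k hk hkpre
    · intro p hp j hj q hq hqt
      obtain ⟨b, hb, rfl⟩ := List.mem_iff_getElem.mp hp
      obtain ⟨a, ha, rfl⟩ := List.mem_iff_getElem.mp hq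
      have hlenq : s[a].toList.length = j := by
        rw [hqt, List.length_take]; omega
      have hpre : s[a].toList <+: s[b].toList := by
        rw [List.prefix_iff_eq_take, hlenq]; exact hqt
      have hne : s[a].toList ≠ s[b].toList := by
        intro h
        rw [h] at hlenq
        omega
      have hab : a < b := by
        rcases Nat.lt_trichotomy a b with h | h | h
        · exact h
        · subst h; exact absurd rfl hne
        · have hle : s[b] ≤ s[a] := List.pairwise_iff_getElem.mp hs b a hb ha h
          have hlt : s[a].toList < s[b].toList := lex_prefix_lt _ _ hpre hne
          exact absurd hlt (not_lt_of_ge (String.le_iff_toList_le.mp hle))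
      obtain ⟨k, hk, hkpre⟩ := step_adjacent s hs hab hb hpre
      exact hA k hk hkpre
  · -- PropB → PropA
    rintro ⟨hnd, hnp⟩ k hk hpre
    by_cases heq : s[k].toList = s[k+1].toList
    · -- duplicate
      have := List.pairwise_iff_getElem.mp hnd k (k+1) (by omega) hk (by omega)
      exact this (String.toList_inj.mp heq)
    · -- proper prefix
      have hlen : s[k].toList.length < s[k+1].toList.length := by
        rcases Nat.lt_or_ge s[k].toList.length s[k+1].toList.length with h | h
        · exact h
        · exact absurd (hpre.eq_of_length (le_antisymm hpre.length_le h)) heq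
      exact hnp s[k+1] (List.mem_iff_getElem.mpr ⟨k+1, hk, rfl⟩)
        s[k].toList.length hlen
        s[k] (List.mem_iff_getElem.mpr ⟨k, by omega, rfl⟩)
        (List.prefix_iff_eq_take.mp hpre)

-- the loop condition of A at index k+1 is exactly "s[k] is a prefix of s[k+1]"
theorem cond_iff (s : List String) (k : Nat) (hk : k + 1 < s.length) :
    ((PySem.List.pyGetD s (((k+1 : Nat) : Int) - 1) "" ==
        PySem.Str.slice (PySem.List.pyGetD s ((k+1 : Nat) : Int) "") none
          (some (PySem.Str.len (PySem.List.pyGetD s (((k+1 : Nat) : Int) - 1) "")))) = true)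
    ↔ s[k].toList <+: s[k+1].toList := by
  have h1 : ((k+1 : Nat) : Int) - 1 = ((k : Nat) : Int) := by push_cast; ring
  rw [h1, PySem.List.pyGetD_natCast, PySem.List.pyGetD_natCast,
      List.getD_eq_getElem s "" (show k < s.length by omega), List.getD_eq_getElem s "" hk,
      beq_iff_eq, ← String.toList_inj, PySem.Str.toList_slice, PySem.Chars.slice_eq_listSlice,
      PySem.Str.len_eq, PySem.List.slice_to_natCast, List.prefix_iff_eq_take]

-- characterization of port A's loop
theorem a_body (s : List String) :
    ((PySem.List.pyRange 1 (s.length : Int)).foldl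
      (fun answer i =>
        if PySem.List.pyGetD s (i - 1) "" ==
            PySem.Str.slice (PySem.List.pyGetD s i "") none
              (some (PySem.Str.len (PySem.List.pyGetD s (i - 1) "")))
        then false else answer) true = true)
    ↔ PropA s := by
  rw [PySem.List.foldl_if_false_eq, Bool.true_and, Bool.not_eq_true', List.any_eq_false]
  constructor
  · intro h k hk hpre
    have hm : ((k+1 : Nat) : Int) ∈ PySem.List.pyRange 1 (s.length : Int) :=
      PySem.List.mem_pyRange_one.mpr ⟨by omega, by omega⟩
    exact h _ hm ((cond_iff s k hk).mpr hpre)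
  · intro h i hi hc
    obtain ⟨h1i, h2i⟩ := PySem.List.mem_pyRange_one.mp hi
    obtain ⟨n, rfl⟩ : ∃ n : Nat, i = (n : Int) := ⟨i.toNat, by omega⟩
    obtain ⟨k, rfl⟩ : ∃ k, n = k + 1 := ⟨n - 1, by omega⟩
    have hk : k + 1 < s.length := by omega
    exact h k hk ((cond_iff s k hk).mp hc)

-- characterization of port A
theorem solution_eq_propA (pb : List String) :
    solution pb = true ↔ PropA (PySem.List.sorted pb (fun x => x)) := by
  simp only [solution]
  exact a_body _

-- characterization of port B's body
theorem alt_body (s : List String) :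
    ((if (PySem.Set.ofList s : List String).length ≠ s.length then false
      else
        !(s.any fun p =>
          (PySem.List.pyRange 0 (PySem.Str.len p)).any fun j =>
            PySem.Set.contains (PySem.Set.ofList s) (PySem.Str.slice p none (some j)))) = true)
    ↔ PropB s := by
  by_cases hlen : (PySem.Set.ofList s : List String).length ≠ s.length
  · rw [if_pos hlen]
    refine iff_of_false (by simp) (fun hB => hlen ?_)
    rw [PySem.Set.ofList_eq_self_of_nodup s hB.1]
  · rw [if_neg hlen]
    have he : (PySem.Set.ofList s : List String).length = s.length := not_ne_iff.mp hlen
    have hnd : s.Nodup := by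
      have hsub := List.subperm_of_subset (PySem.Set.nodup_ofList s)
        (fun y hy => (PySem.Set.mem_ofList s y).mp hy)
      exact ((hsub.perm_of_length_le (le_of_eq he.symm)).nodup_iff).mp (PySem.Set.nodup_ofList s)
    rw [Bool.not_eq_true', List.any_eq_false]
    constructor
    · intro h
      refine ⟨hnd, ?_⟩
      intro p hp j hj q hq hqt
      apply h p hp
      rw [List.any_eq_true]
      refine ⟨(j : Int), PySem.List.mem_pyRange_one.mpr
        ⟨by omega, by rw [PySem.Str.len_eq]; omega⟩, ?_⟩
      have hts : PySem.Str.slice p none (some (j : Int)) = q := by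
        rw [← String.toList_inj, PySem.Str.toList_slice, PySem.Chars.slice_eq_listSlice,
          PySem.List.slice_to_natCast, hqt]
      rw [hts]
      have hq' : q ∈ PySem.Set.ofList s := (PySem.Set.mem_ofList s q).mpr hq
      simpa [PySem.Set.contains] using hq'
    · rintro ⟨-, hB⟩ p hp hc
      rw [List.any_eq_true] at hc
      obtain ⟨j, hjm, hcj⟩ := hc
      obtain ⟨hj0, hjlt⟩ := PySem.List.mem_pyRange_one.mp hjm
      obtain ⟨jn, rfl⟩ : ∃ n : Nat, j = (n : Int) := ⟨j.toNat, by omega⟩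
      rw [PySem.Str.len_eq] at hjlt
      have hjn : jn < p.toList.length := by exact_mod_cast hjlt
      have hmem : PySem.Str.slice p none (some (jn : Int)) ∈ s := by
        have h' : PySem.Str.slice p none (some (jn : Int)) ∈ PySem.Set.ofList s := by
          simpa [PySem.Set.contains] using hcj
        exact (PySem.Set.mem_ofList s _).mp h'
      refine hB p hp jn hjn _ hmem ?_
      rw [PySem.Str.toList_slice, PySem.Chars.slice_eq_listSlice, PySem.List.slice_to_natCast]

-- characterization of port B
theorem solution_alt_eq_propB (pb : List String) :
    solution_alt pb = true ↔ PropB (PySem.List.sorted pb (fun x => x)) := by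
  simp only [solution_alt]
  exact alt_body _

-- ===== VERDICT (by name: the statement is the Claim_ definition above) =====
theorem solution_spec : Claim_equal_solution := by
  intro pb _
  unfold Spec_solution
  rw [Bool.eq_iff_iff, solution_eq_propA, solution_alt_eq_propB]
  exact propA_iff_propB _ (PySem.List.sorted_pairwise pb (fun x => x))
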